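-- pv_equiv track=rewrite | github.com/stephenHahn88/travelling_counterpoint | python/kern_to_contrapuntal_motions.py | midi_num_to_events
-- ===== SOURCE A (Python) =====
-- from pprint import pprint
--
-- def midi_num_to_events(midi_nums):
--     len1 = len(list(midi_nums.values())[0])
--     for v in midi_nums.values():
--         if len(v) != len1:
--             raise ValueError(f"All values of midi_nums should have same length. Got {len(v)} for one and {len1} for another.")
--     events = []
--     prev_b, prev_a, prev_s = 60, 60, 60
--     voices = [v for v in midi_nums.values()]
--     for b, a, s in zip(voices[0], voices[1], voices[2]):
--         if a[1] == 99 and b[1] == 99 and s[1] == 99: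
--             continue
--         shortestDuration = min(b[1], a[1], s[1])
--         notes, b, prev_b = append_voice([], b[0], prev_b)
--         notes, a, prev_a = append_voice(notes, a[0], prev_a)
--         notes, s, prev_s = append_voice(notes, s[0], prev_s)
--         events.append((shortestDuration, tuple(notes)))
--     pprint(events)
--     return events
--
-- def append_voice(notes, n, prev_n):
--     if n != 0:
--         notes.append(n)
--         prev_n = n
--     else:
--         notes.append(prev_n)
--     return notes, n, prev_n
-- ===== SOURCE B (Python) =====
-- def midi_num_to_events(midi_nums):
--     voices = list(midi_nums.values())
--     len1 = len(voices[0])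
--     for v in voices:
--         if len(v) != len1:
--             raise ValueError(f"All values of midi_nums should have same length. Got {len(v)} for one and {len1} for another.")
--     b, a, s = voices[0], voices[1], voices[2]
--     # keep only the rows where not all three durations are 99
--     rows = [(x, y, z) for x, y, z in zip(b, a, s)
--             if not (y[1] == 99 and x[1] == 99 and z[1] == 99)]
--
--     def resolve(notes):
--         out, carry = [], 60
--         for n in notes:
--             if n != 0:
--                 carry = n
--             out.append(carry)
--         return out
--
--     nb = resolve([x[0] for x, _, _ in rows])
--     na = resolve([y[0] for _, y, _ in rows])
--     ns = resolve([z[0] for _, _, z in rows])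
--     events = [(min(x[1], y[1], z[1]), (p, q, r))
--               for (x, y, z), p, q, r in zip(rows, nb, na, ns)]
--     return events
-- ===== Notes on version B (the rewrite author's own statement) =====
-- stated objective: alternative
-- what changed: Replaces A's single interleaved loop that threads three prev-note carries through a mutating append_voice helper with a different decomposition: first filter the all-99-duration rows jointly, then resolve each voice independently with its own carry pass, then zip the three resolved note lists with the per-row minimum durations.
import Mathlib
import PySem

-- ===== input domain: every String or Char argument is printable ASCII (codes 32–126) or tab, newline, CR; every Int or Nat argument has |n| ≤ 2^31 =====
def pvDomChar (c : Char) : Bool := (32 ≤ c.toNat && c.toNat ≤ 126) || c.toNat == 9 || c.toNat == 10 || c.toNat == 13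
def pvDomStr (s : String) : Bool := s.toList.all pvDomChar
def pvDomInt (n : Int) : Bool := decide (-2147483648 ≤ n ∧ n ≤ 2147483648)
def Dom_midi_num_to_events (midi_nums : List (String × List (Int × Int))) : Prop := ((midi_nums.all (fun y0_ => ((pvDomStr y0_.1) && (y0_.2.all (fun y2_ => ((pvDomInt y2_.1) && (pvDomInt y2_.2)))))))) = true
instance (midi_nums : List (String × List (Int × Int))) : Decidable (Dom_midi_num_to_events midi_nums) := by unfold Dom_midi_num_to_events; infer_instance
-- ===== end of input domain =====

-- B replaces A's single carry-threading loop by filter + three per-voice resolve passes + a zip;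
-- same cost, different decomposition.  A also pprints the events before returning (a print side
-- effect B omits); the equivalence proved here is about the return value only.

-- ===== PORT A =====
-- append_voice(notes, n, prev_n)
def appendVoice (notes : List Int) (n prev_n : Int) : List Int × Int × Int :=
  if n ≠ 0 then (notes ++ [n], n, n) else (notes ++ [prev_n], n, prev_n)

-- the for-loop over zip(voices[0], voices[1], voices[2]) with state (prev_b, prev_a, prev_s, events)
def midiLoopA : List ((Int × Int) × (Int × Int) × (Int × Int)) → Int → Int → Int → List (Int × List Int) → List (Int × List Int)
  | [], _, _, _, events => events
  | (b, a, s) :: rest, prev_b, prev_a, prev_s, events =>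
    if a.2 == 99 && b.2 == 99 && s.2 == 99 then
      midiLoopA rest prev_b prev_a prev_s events
    else
      let shortestDuration := min b.2 (min a.2 s.2)
      let r1 := appendVoice [] b.1 prev_b
      let r2 := appendVoice r1.1 a.1 prev_a
      let r3 := appendVoice r2.1 s.1 prev_s
      midiLoopA rest r1.2.2 r2.2.2 r3.2.2 (events ++ [(shortestDuration, r3.1)])

def midi_num_to_events (midi_nums : List (String × List (Int × Int))) : List (Int × List Int) :=
  let voices := (PySem.Dict.ofList midi_nums).values
  -- voices[0..2]; Pre_ guarantees these indices exist (Python raises IndexError otherwise)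
  midiLoopA ((voices.getD 0 []).zip ((voices.getD 1 []).zip (voices.getD 2 []))) 60 60 60 []

-- ===== PORT B =====
-- resolve(notes): carry pass for one voice, carry starts at 60
def resolveVoice (notes : List Int) : List Int :=
  (notes.foldl (fun st n =>
      let carry := if n ≠ 0 then n else st.2
      (st.1 ++ [carry], carry)) (([] : List Int), (60 : Int))).1

def midi_num_to_events_alt (midi_nums : List (String × List (Int × Int))) : List (Int × List Int) :=
  let voices := (PySem.Dict.ofList midi_nums).values
  let b := voices.getD 0 []
  let a := voices.getD 1 []
  let s := voices.getD 2 []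
  let rows := (b.zip (a.zip s)).filter
      (fun t => !(t.2.1.2 == 99 && t.1.2 == 99 && t.2.2.2 == 99))
  let nb := resolveVoice (rows.map (fun t => t.1.1))
  let na := resolveVoice (rows.map (fun t => t.2.1.1))
  let ns := resolveVoice (rows.map (fun t => t.2.2.1))
  (rows.zip (nb.zip (na.zip ns))).map
      (fun q => (min q.1.1.2 (min q.1.2.1.2 q.1.2.2.2), [q.2.1, q.2.2.1, q.2.2.2]))

-- ===== PRECONDITION & SPEC =====
-- Pre_ excludes exactly the inputs where the Python raises: fewer than three voices in the dict
-- (IndexError, including the empty dict) or voices of unequal lengths (ValueError).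
def Pre_midi_num_to_events (midi_nums : List (String × List (Int × Int))) : Prop :=
  let voices := (PySem.Dict.ofList midi_nums).values
  3 ≤ voices.length ∧ ∀ v ∈ voices, v.length = voices.headI.length
instance (midi_nums : List (String × List (Int × Int))) : Decidable (Pre_midi_num_to_events midi_nums) := by unfold Pre_midi_num_to_events; infer_instance

def pvWitness_midi_num_to_events : (List (String × List (Int × Int))) :=
  [("a", [(1, 2), (0, 99)]), ("b", [(0, 3), (0, 99)]), ("c", [(5, 99), (2, 1)])]

def Spec_midi_num_to_events (midi_nums : List (String × List (Int × Int))) (out : List (Int × List Int)) : Prop := out = midi_num_to_events_alt midi_nums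
instance (midi_nums : List (String × List (Int × Int))) (out : List (Int × List Int)) : Decidable (Spec_midi_num_to_events midi_nums out) := by unfold Spec_midi_num_to_events; infer_instance

-- ===== CLAIM (what is proved, stated in full; the proofs are below) =====
def Claim_equal_midi_num_to_events : Prop := ∀ (midi_nums : List (String × List (Int × Int))), Dom_midi_num_to_events midi_nums → Pre_midi_num_to_events midi_nums → Spec_midi_num_to_events midi_nums (midi_num_to_events midi_nums)

-- ===== LEMMAS AND PROOFS =====

-- the per-voice step value: the note appended AND the new carry in both programs
def updC (n c : Int) : Int := if n ≠ 0 then n else c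

-- the body of resolve's loop, named for the proofs (defeq to the lambda in resolveVoice)
def stepR (st : List Int × Int) (n : Int) : List Int × Int :=
  let carry := if n ≠ 0 then n else st.2
  (st.1 ++ [carry], carry)

-- resolveVoice with an arbitrary starting carry
def resolveFrom (notes : List Int) (c : Int) : List Int :=
  (notes.foldl stepR (([] : List Int), c)).1

theorem resolveVoice_eq (notes : List Int) : resolveVoice notes = resolveFrom notes 60 := rfl

theorem foldl_acc (t : List Int) : ∀ (acc : List Int) (c : Int),
    (t.foldl stepR (acc, c)).1 = acc ++ (t.foldl stepR (([] : List Int), c)).1 := by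
  induction t with
  | nil => simp
  | cons n t ih =>
    intro acc c
    rw [List.foldl_cons, List.foldl_cons, show stepR (acc, c) n = (acc ++ [updC n c], updC n c) from rfl,
      show stepR ([], c) n = ([updC n c], updC n c) from rfl, ih, ih [updC n c]]
    simp

theorem resolveFrom_cons (n : Int) (t : List Int) (c : Int) :
    resolveFrom (n :: t) c = updC n c :: resolveFrom t (updC n c) := by
  rw [resolveFrom, List.foldl_cons, show stepR ([], c) n = ([updC n c], updC n c) from rfl, foldl_acc]
  rfl

-- B's combine phase on the filtered rows, with arbitrary carries
def combineB (rows : List ((Int × Int) × (Int × Int) × (Int × Int))) (c1 c2 c3 : Int) : List (Int × List Int) :=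
  (rows.zip ((resolveFrom (rows.map (fun t => t.1.1)) c1).zip
    ((resolveFrom (rows.map (fun t => t.2.1.1)) c2).zip
     (resolveFrom (rows.map (fun t => t.2.2.1)) c3)))).map
      (fun q => (min q.1.1.2 (min q.1.2.1.2 q.1.2.2.2), [q.2.1, q.2.2.1, q.2.2.2]))

theorem combineB_cons (t : (Int × Int) × (Int × Int) × (Int × Int))
    (r : List ((Int × Int) × (Int × Int) × (Int × Int))) (c1 c2 c3 : Int) :
    combineB (t :: r) c1 c2 c3
      = (min t.1.2 (min t.2.1.2 t.2.2.2), [updC t.1.1 c1, updC t.2.1.1 c2, updC t.2.2.1 c3])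
        :: combineB r (updC t.1.1 c1) (updC t.2.1.1 c2) (updC t.2.2.1 c3) := by
  simp [combineB, resolveFrom_cons]

theorem midiLoopA_eq (rows : List ((Int × Int) × (Int × Int) × (Int × Int))) :
    ∀ (c1 c2 c3 : Int) (events : List (Int × List Int)),
    midiLoopA rows c1 c2 c3 events
      = events ++ combineB (rows.filter
          (fun t => !(t.2.1.2 == 99 && t.1.2 == 99 && t.2.2.2 == 99))) c1 c2 c3 := by
  induction rows with
  | nil => intro c1 c2 c3 events; simp [midiLoopA, combineB]
  | cons t rest ih =>
    intro c1 c2 c3 events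
    obtain ⟨b, a, s⟩ := t
    cases hc : (a.2 == 99 && b.2 == 99 && s.2 == 99) with
    | true =>
      rw [show midiLoopA ((b, a, s) :: rest) c1 c2 c3 events = midiLoopA rest c1 c2 c3 events from by
          simp only [midiLoopA, hc]; rfl,
        ih, List.filter_cons, if_neg (by rw [hc]; simp)]
    | false =>
      rw [show midiLoopA ((b, a, s) :: rest) c1 c2 c3 events
          = midiLoopA rest (updC b.1 c1) (updC a.1 c2) (updC s.1 c3)
              (events ++ [(min b.2 (min a.2 s.2), [updC b.1 c1, updC a.1 c2, updC s.1 c3])]) from by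
          simp only [midiLoopA, hc, Bool.false_eq_true, if_false, appendVoice, updC]
          split_ifs <;> rfl,
        ih, List.filter_cons, if_pos (by rw [hc]; rfl), combineB_cons]
      simp

-- ===== VERDICT (by name: the statement is the Claim_ definition above) =====
theorem midi_num_to_events_spec : Claim_equal_midi_num_to_events := by
  intro midi_nums _hdom _hpre
  unfold Spec_midi_num_to_events midi_num_to_events midi_num_to_events_alt
  rw [midiLoopA_eq]
  simp [combineB, resolveVoice_eq]
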